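-- pv_equiv track=rewrite | github.com/pumpkinzomb/korean-spacing | scripts/train.py | build_example
-- ===== SOURCE A (Python) =====
-- from typing import Dict, List, Optional, Tuple
--
-- MAX_LENGTH = 512
--
-- def build_example(text: str) -> Optional[Tuple[str, List[int]]]:
--     """원본 텍스트에서 공백/개행 라벨과 문자 시퀀스를 생성."""
--     if not text or not isinstance(text, str):
--         return None
--
--     text = text.strip()
--     if len(text) < 5:
--         return None
--
--     base_chars: List[str] = []
--     labels: List[int] = []
--
--     for ch in text:
--         if ch in {"\n", "\r"}:
--             if labels:
--                 labels[-1] = 2  # 개행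
--             continue
--         if ch.isspace():
--             if labels and labels[-1] < 2:
--                 labels[-1] = 1  # 공백
--             continue
--         base_chars.append(ch)
--         labels.append(0)
--
--     if not base_chars:
--         return None
--
--     if len(base_chars) > MAX_LENGTH:
--         base_chars = base_chars[:MAX_LENGTH]
--         labels = labels[:MAX_LENGTH]
--
--     return "".join(base_chars), labels
-- ===== SOURCE B (Python) =====
-- from typing import Dict, List, Optional, Tuple
--
-- MAX_LENGTH = 512
--
-- def build_example(text: str) -> Optional[Tuple[str, List[int]]]:
--     """Run-based rewrite: same guards, but scans whitespace/non-whitespace runs."""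
--     if not text or not isinstance(text, str):
--         return None
--
--     text = text.strip()
--     if len(text) < 5:
--         return None
--
--     base_chars: List[str] = []
--     labels: List[int] = []
--     i, n = 0, len(text)
--     while i < n:
--         j = i
--         if text[i].isspace():
--             has_nl = False
--             while j < n and text[j].isspace():
--                 if text[j] in ("\n", "\r"):
--                     has_nl = True
--                 j += 1
--             if labels:
--                 labels[-1] = 2 if has_nl else 1
--         else:
--             while j < n and not text[j].isspace():
--                 j += 1
--             base_chars.append(text[i:j])
--             labels.extend([0] * (j - i))
--         i = j
--
--     chars = "".join(base_chars)
--     if not chars: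
--         return None
--
--     if len(chars) > MAX_LENGTH:
--         chars = chars[:MAX_LENGTH]
--         labels = labels[:MAX_LENGTH]
--
--     return chars, labels
-- ===== Notes on version B (the rewrite author's own statement) =====
-- stated objective: alternative
-- what changed: The char-by-char loop that repeatedly rewrites labels[-1] is replaced by a run-based scan: each maximal whitespace run is consumed at once and yields one per-run decision (2 if the run holds a newline, else 1), each non-whitespace run is appended in one slice with a block of zero labels.
import Mathlib
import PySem

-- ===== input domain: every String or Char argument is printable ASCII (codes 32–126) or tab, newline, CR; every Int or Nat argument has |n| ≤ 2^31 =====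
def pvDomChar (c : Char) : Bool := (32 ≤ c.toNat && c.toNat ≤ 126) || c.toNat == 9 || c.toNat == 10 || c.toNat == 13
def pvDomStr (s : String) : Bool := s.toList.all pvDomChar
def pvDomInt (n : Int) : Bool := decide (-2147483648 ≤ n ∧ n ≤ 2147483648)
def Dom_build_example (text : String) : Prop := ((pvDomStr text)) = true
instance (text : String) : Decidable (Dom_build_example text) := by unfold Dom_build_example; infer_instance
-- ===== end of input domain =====

-- B replaces A's char-by-char scan that rewrites labels[-1] with a run-based scan deciding
-- each whitespace run at once (objective: alternative decomposition, same cost).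

-- ===== PORT A =====
-- accumulators are kept REVERSED (Python's append = cons, labels[-1] = head); reversed at the end
def aStep (st : List Char × List Int) (ch : Char) : List Char × List Int :=
  if ch == '\n' || ch == '\r' then
    match st with
    | (b, []) => (b, [])
    | (b, _ :: l) => (b, 2 :: l)
  else if PySem.Chars.isspace ch then
    match st with
    | (b, []) => (b, [])
    | (b, x :: l) => if x < 2 then (b, 1 :: l) else (b, x :: l)
  else (ch :: st.1, (0:Int) :: st.2)

def build_example (text : String) : Option (String × List Int) :=
  if text.toList = [] then none           -- "not text"; isinstance is always true under the type convention
  else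
    let t := PySem.Chars.strip text.toList
    if t.length < 5 then none
    else
      let st := t.foldl aStep ([], [])
      let base_chars := st.1.reverse
      let labels := st.2.reverse
      if base_chars = [] then none
      else if base_chars.length > 512 then
        some (String.mk (base_chars.take 512), labels.take 512)   -- xs[:512] on 0 ≤ bound = take
      else some (String.mk base_chars, labels)

-- ===== PORT B =====
def bNl (w : List Char) : Bool := w.any (fun c => c == '\n' || c == '\r')

-- the outer while loop of Source B; b and l are the (reversed) accumulators, l's head = labels[-1]
def bGo : List Char → List Char → List Int → List Char × List Int
  | [], b, l => (b, l)
  | c :: cs, b, l =>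
    if PySem.Chars.isspace c then
      let w := c :: cs.takeWhile PySem.Chars.isspace
      let rest := cs.dropWhile PySem.Chars.isspace
      let l' := match l with
        | [] => ([] : List Int)
        | _ :: t => (if bNl w then (2:Int) else 1) :: t
      bGo rest b l'
    else
      let p := c :: cs.takeWhile (fun d => !PySem.Chars.isspace d)
      let rest := cs.dropWhile (fun d => !PySem.Chars.isspace d)
      bGo rest (p.reverse ++ b) (p.map (fun _ => (0:Int)) ++ l)
termination_by cs => cs.length
decreasing_by
  all_goals exact Nat.lt_succ_of_le (List.length_dropWhile_le _ _)

def build_example_alt (text : String) : Option (String × List Int) :=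
  if text.toList = [] then none
  else
    let t := PySem.Chars.strip text.toList
    if t.length < 5 then none
    else
      let st := bGo t [] []
      let base_chars := st.1.reverse
      let labels := st.2.reverse
      if base_chars = [] then none
      else if base_chars.length > 512 then
        some (String.mk (base_chars.take 512), labels.take 512)
      else some (String.mk base_chars, labels)

-- ===== PRECONDITION & SPEC =====
def Spec_build_example (text : String) (out : Option (String × List Int)) : Prop := out = build_example_alt text
instance (text : String) (out : Option (String × List Int)) : Decidable (Spec_build_example text out) := by unfold Spec_build_example; infer_instance

-- ===== CLAIM (what is proved, stated in full; the proofs are below) =====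
def Claim_equal_build_example : Prop := ∀ (text : String), Dom_build_example text → Spec_build_example text (build_example text)

-- ===== LEMMAS AND PROOFS =====

lemma nl_isspace {c : Char} (h : (c == '\n' || c == '\r') = true) :
    PySem.Chars.isspace c = true := by
  rcases Bool.or_eq_true_iff.mp h with h | h <;>
    · rw [beq_iff_eq.mp h]; decide

lemma foldl_ws_nil (w : List Char) (b : List Char) (hw : ∀ c ∈ w, PySem.Chars.isspace c = true) :
    List.foldl aStep (b, []) w = (b, []) := by
  induction w with
  | nil => rfl
  | cons c w ih =>
      have hc := hw c (List.mem_cons_self ..)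
      have ih' := ih fun d hd => hw d (List.mem_cons_of_mem _ hd)
      simp only [List.foldl_cons, aStep, hc, if_true, ite_self]
      exact ih'

lemma foldl_ws_two (w : List Char) (b : List Char) (l : List Int)
    (hw : ∀ c ∈ w, PySem.Chars.isspace c = true) :
    List.foldl aStep (b, 2 :: l) w = (b, 2 :: l) := by
  induction w with
  | nil => rfl
  | cons c w ih =>
      have hc := hw c (List.mem_cons_self ..)
      have ih' := ih fun d hd => hw d (List.mem_cons_of_mem _ hd)
      simp only [List.foldl_cons, aStep, hc, if_true]
      split
      · exact ih'
      · rw [if_neg (by omega : ¬(2:Int) < 2)]; exact ih'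

lemma foldl_ws_one (w : List Char) (b : List Char) (l : List Int)
    (hw : ∀ c ∈ w, PySem.Chars.isspace c = true) :
    List.foldl aStep (b, 1 :: l) w = (b, (if bNl w then (2:Int) else 1) :: l) := by
  induction w with
  | nil => simp [bNl]
  | cons c w ih =>
      have hc := hw c (List.mem_cons_self ..)
      have hw' : ∀ d ∈ w, PySem.Chars.isspace d = true := fun d hd => hw d (List.mem_cons_of_mem _ hd)
      simp only [List.foldl_cons, aStep, hc, if_true]
      cases hnl : (c == '\n' || c == '\r') with
      | true =>
          rw [if_pos rfl, foldl_ws_two w b l hw']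
          have hb : bNl (c :: w) = true := by
            simp only [bNl, List.any_cons, hnl, Bool.true_or]
          rw [hb, if_pos rfl]
      | false =>
          simp only [Bool.false_eq_true, if_false]
          rw [if_pos (by omega : (1:Int) < 2), ih hw']
          have hb : bNl (c :: w) = bNl w := by
            simp only [bNl, List.any_cons, hnl, Bool.false_or]
          rw [hb]

lemma foldl_ws_run (w : List Char) (b : List Char) (l : List Int) (x : Int)
    (hne : w ≠ []) (hw : ∀ c ∈ w, PySem.Chars.isspace c = true) (hx : x ≤ 1) :
    List.foldl aStep (b, x :: l) w = (b, (if bNl w then (2:Int) else 1) :: l) := by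
  cases w with
  | nil => exact absurd rfl hne
  | cons c w =>
      have hc := hw c (List.mem_cons_self ..)
      have hw' : ∀ d ∈ w, PySem.Chars.isspace d = true := fun d hd => hw d (List.mem_cons_of_mem _ hd)
      simp only [List.foldl_cons, aStep, hc, if_true]
      cases hnl : (c == '\n' || c == '\r') with
      | true =>
          rw [if_pos rfl, foldl_ws_two w b l hw']
          have hb : bNl (c :: w) = true := by
            simp only [bNl, List.any_cons, hnl, Bool.true_or]
          rw [hb, if_pos rfl]
      | false =>
          simp only [Bool.false_eq_true, if_false]
          rw [if_pos (by omega : x < 2), foldl_ws_one w b l hw']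
          have hb : bNl (c :: w) = bNl w := by
            simp only [bNl, List.any_cons, hnl, Bool.false_or]
          rw [hb]

lemma zeros_shift (p : List Char) (l : List Int) :
    List.map (fun _ => (0:Int)) p ++ 0 :: l = 0 :: (List.map (fun _ => (0:Int)) p ++ l) := by
  induction p with
  | nil => rfl
  | cons c p ih => simp only [List.map_cons, List.cons_append, ih]

lemma foldl_nonws (p : List Char) (b : List Char) (l : List Int)
    (hp : ∀ c ∈ p, PySem.Chars.isspace c = false) :
    List.foldl aStep (b, l) p = (p.reverse ++ b, p.map (fun _ => (0:Int)) ++ l) := by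
  induction p generalizing b l with
  | nil => simp
  | cons c p ih =>
      have hc := hp c (List.mem_cons_self ..)
      have hnl : (c == '\n' || c == '\r') = false := by
        cases heq : (c == '\n' || c == '\r') with
        | false => rfl
        | true => exact absurd (nl_isspace heq) (by simp [hc])
      simp only [List.foldl_cons, aStep, hnl, hc, Bool.false_eq_true, if_false]
      rw [ih (c :: b) (0 :: l) (fun d hd => hp d (List.mem_cons_of_mem _ hd)), zeros_shift]
      simp

def pvInv : List Char → List Int → Prop
  | _, [] => True
  | [], _ => True
  | c :: _, x :: _ => PySem.Chars.isspace c = true → x ≤ 1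

lemma main_loop : ∀ (n : Nat) (cs : List Char) (b : List Char) (l : List Int),
    cs.length ≤ n → pvInv cs l → List.foldl aStep (b, l) cs = bGo cs b l := by
  intro n
  induction n with
  | zero =>
      intro cs b l hlen _
      have : cs = [] := List.eq_nil_of_length_eq_zero (Nat.le_zero.mp hlen)
      subst this; simp [bGo]
  | succ n ih =>
      intro cs b l hlen hinv
      cases cs with
      | nil => simp [bGo]
      | cons c cs =>
          by_cases hc : PySem.Chars.isspace c = true
          · have hsplit : c :: cs =
                (c :: cs.takeWhile PySem.Chars.isspace) ++ cs.dropWhile PySem.Chars.isspace := by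
              simp [List.takeWhile_append_dropWhile]
            have hwall : ∀ d ∈ c :: cs.takeWhile PySem.Chars.isspace,
                PySem.Chars.isspace d = true := by
              intro d hd
              rcases List.mem_cons.mp hd with h | h
              · subst h; exact hc
              · exact List.mem_takeWhile_imp h
            have hrestlen : (cs.dropWhile PySem.Chars.isspace).length ≤ n :=
              le_trans (List.length_dropWhile_le _ _) (Nat.le_of_succ_le_succ hlen)
            have hrestinv : ∀ l', pvInv (cs.dropWhile PySem.Chars.isspace) l' := by
              intro l'
              cases hrest : cs.dropWhile PySem.Chars.isspace with
              | nil => cases l' <;> trivial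
              | cons r rs =>
                  cases l' with
                  | nil => trivial
                  | cons x t =>
                      intro hr
                      exfalso
                      have h := List.head_dropWhile_not PySem.Chars.isspace
                        (w := by simp [hrest]) (l := cs)
                      simp only [hrest, List.head_cons] at h
                      rw [hr] at h; cases h
            conv_lhs => rw [hsplit]
            rw [List.foldl_append]
            cases l with
            | nil =>
                rw [foldl_ws_nil _ b hwall,
                  ih _ b [] hrestlen (hrestinv [])]
                conv_rhs => rw [bGo]
                simp [hc]
            | cons x t =>
                have hx : x ≤ 1 := hinv hc
                rw [foldl_ws_run _ b t x (by simp) hwall hx,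
                  ih _ b _ hrestlen (hrestinv _)]
                conv_rhs => rw [bGo]
                simp [hc]
          · have hc' : PySem.Chars.isspace c = false := Bool.eq_false_iff.mpr hc
            have hsplit : c :: cs =
                (c :: cs.takeWhile (fun d => !PySem.Chars.isspace d)) ++
                  cs.dropWhile (fun d => !PySem.Chars.isspace d) := by
              simp [List.takeWhile_append_dropWhile]
            have hpall : ∀ d ∈ c :: cs.takeWhile (fun d => !PySem.Chars.isspace d),
                PySem.Chars.isspace d = false := by
              intro d hd
              rcases List.mem_cons.mp hd with h | h
              · subst h; exact hc'
              · have := List.mem_takeWhile_imp h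
                simpa using this
            have hrestlen : (cs.dropWhile (fun d => !PySem.Chars.isspace d)).length ≤ n :=
              le_trans (List.length_dropWhile_le _ _) (Nat.le_of_succ_le_succ hlen)
            have hrestinv : pvInv (cs.dropWhile (fun d => !PySem.Chars.isspace d))
                ((c :: cs.takeWhile (fun d => !PySem.Chars.isspace d)).map (fun _ => (0:Int)) ++ l) := by
              cases hrest : cs.dropWhile (fun d => !PySem.Chars.isspace d) with
              | nil => trivial
              | cons r rs =>
                  simp only [List.map_cons, List.cons_append, pvInv]
                  intro _; norm_num
            conv_lhs => rw [hsplit]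
            rw [List.foldl_append,
              foldl_nonws _ b l hpall,
              ih _ _ _ hrestlen hrestinv]
            conv_rhs => rw [bGo]
            simp [hc']

-- ===== VERDICT (by name: the statement is the Claim_ definition above) =====
theorem build_example_spec : Claim_equal_build_example := by
  intro text _
  unfold Spec_build_example build_example build_example_alt
  have h := main_loop (PySem.Chars.strip text.toList).length
      (PySem.Chars.strip text.toList) [] [] le_rfl (by cases PySem.Chars.strip text.toList <;> trivial)
  simp only [h]
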